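-- pv_equiv track=rewrite | github.com/NavonilDas/EyantraSupplyBot | Task4/main.py | get_node_no
-- ===== SOURCE A (Python) =====
-- NODES_ANGLE = [
--     [328,20],
--     [20,49],
--     [49,92],
--     [92,138],
--     [138,166],
--     [166,191],
--     [191,240],
--     [240,272],
--     [272,328]
-- ]
--
-- def get_node_no(deg):
--     """Returns the index of Node on the basis NODES_ANGLE table
--     Keyword arguments:
--     deg -- Degrees
--     """
--     # if deg is less than 20 then it is the first index
--     aur_node = 0
--     if deg > 20:
--         for node in NODES_ANGLE:
--             if node[0] <= deg and node[1] >= deg: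
--                 break
--             aur_node = aur_node + 1
--     return aur_node
-- ===== SOURCE B (Python) =====
-- _T = [20, 49, 92, 138, 166, 191, 240, 272, 328]
--
-- def get_node_no(deg):
--     """Binary search for deg's bucket in the sorted upper-bound table."""
--     lo, hi = 0, len(_T)
--     while lo < hi:
--         mid = (lo + hi) // 2
--         if _T[mid] < deg:
--             lo = mid + 1
--         else:
--             hi = mid
--     return lo
-- ===== Notes on version B (the rewrite author's own statement) =====
-- stated objective: alternative
-- what changed: Replaces the linear scan over the interval table (with a break and a running counter) by a binary search over the sorted list of upper-bound thresholds; the small-angle guard and the past-the-end bucket fall out of the search automatically.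
import Mathlib
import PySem

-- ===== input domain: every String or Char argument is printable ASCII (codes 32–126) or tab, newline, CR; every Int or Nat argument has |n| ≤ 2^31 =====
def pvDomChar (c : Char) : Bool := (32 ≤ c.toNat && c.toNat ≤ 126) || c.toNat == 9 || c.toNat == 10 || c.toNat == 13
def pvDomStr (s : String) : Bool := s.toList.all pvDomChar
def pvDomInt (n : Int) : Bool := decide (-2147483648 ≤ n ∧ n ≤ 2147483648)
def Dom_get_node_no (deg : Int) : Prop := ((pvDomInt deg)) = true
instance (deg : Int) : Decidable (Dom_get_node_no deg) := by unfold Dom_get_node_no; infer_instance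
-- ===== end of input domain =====

-- B replaces A's linear scan-and-break over the interval table by a binary search over the sorted upper-bound thresholds (objective: alternative).

-- ===== PORT A =====
def NODES_ANGLE : List (List Int) :=
  [[328,20],[20,49],[49,92],[92,138],[138,166],[166,191],[191,240],[240,272],[272,328]]

-- the for-loop with break: returns aur_node at the first matching row, else after the whole list
def get_node_no_loop (deg : Int) : List (List Int) → Int → Int
  | [], aur_node => aur_node
  | node :: rest, aur_node =>
    if (PySem.List.pyGet? node 0).getD 0 ≤ deg ∧ (PySem.List.pyGet? node 1).getD 0 ≥ deg then
      aur_node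
    else
      get_node_no_loop deg rest (aur_node + 1)

def get_node_no (deg : Int) : Int :=
  if deg > 20 then get_node_no_loop deg NODES_ANGLE 0 else 0

-- ===== PORT B =====
def pvThresholds : List Int := [20, 49, 92, 138, 166, 191, 240, 272, 328]

-- the while-loop of Source B's hand-written binary search
def pvBisect (deg : Int) (lo hi : Nat) : Nat :=
  if lo < hi then
    let mid := (lo + hi) / 2
    if (PySem.List.pyGet? pvThresholds (Int.ofNat mid)).getD 0 < deg then
      pvBisect deg (mid + 1) hi
    else
      pvBisect deg lo mid
  else lo
termination_by hi - lo
decreasing_by all_goals omega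

def get_node_no_alt (deg : Int) : Int := Int.ofNat (pvBisect deg 0 9)

-- ===== PRECONDITION & SPEC =====
def Spec_get_node_no (deg : Int) (out : Int) : Prop := out = get_node_no_alt deg
instance (deg : Int) (out : Int) : Decidable (Spec_get_node_no deg out) := by unfold Spec_get_node_no; infer_instance

-- ===== CLAIM (what is proved, stated in full; the proofs are below) =====
def Claim_equal_get_node_no : Prop := ∀ (deg : Int), Dom_get_node_no deg → Spec_get_node_no deg (get_node_no deg)

-- ===== LEMMAS AND PROOFS =====

-- unfold the binary search node by node, bottom-up through the call tree rooted at (0,9)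
theorem pvB_leaf (deg : Int) (k : Nat) : pvBisect deg k k = k := by
  rw [pvBisect]; simp

theorem pvB_01 (deg : Int) : pvBisect deg 0 1 = if 20 < deg then 1 else 0 := by
  rw [pvBisect]; norm_num [pvThresholds, PySem.List.pyGet?, PySem.List.pyIdx?, Int.toNat, Int.toNat, pvB_leaf]

theorem pvB_02 (deg : Int) : pvBisect deg 0 2 =
    if 49 < deg then 2 else if 20 < deg then 1 else 0 := by
  rw [pvBisect]; norm_num [pvThresholds, PySem.List.pyGet?, PySem.List.pyIdx?, Int.toNat, Int.toNat, pvB_leaf, pvB_01]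

theorem pvB_34 (deg : Int) : pvBisect deg 3 4 = if 138 < deg then 4 else 3 := by
  rw [pvBisect]; norm_num [pvThresholds, PySem.List.pyGet?, PySem.List.pyIdx?, Int.toNat, Int.toNat, pvB_leaf]

theorem pvB_04 (deg : Int) : pvBisect deg 0 4 =
    if 92 < deg then (if 138 < deg then 4 else 3)
    else if 49 < deg then 2 else if 20 < deg then 1 else 0 := by
  rw [pvBisect]; norm_num [pvThresholds, PySem.List.pyGet?, PySem.List.pyIdx?, Int.toNat, Int.toNat, pvB_02, pvB_34]

theorem pvB_89 (deg : Int) : pvBisect deg 8 9 = if 328 < deg then 9 else 8 := by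
  rw [pvBisect]; norm_num [pvThresholds, PySem.List.pyGet?, PySem.List.pyIdx?, Int.toNat, Int.toNat, pvB_leaf]

theorem pvB_56 (deg : Int) : pvBisect deg 5 6 = if 191 < deg then 6 else 5 := by
  rw [pvBisect]; norm_num [pvThresholds, PySem.List.pyGet?, PySem.List.pyIdx?, Int.toNat, Int.toNat, pvB_leaf]

theorem pvB_57 (deg : Int) : pvBisect deg 5 7 =
    if 240 < deg then 7 else if 191 < deg then 6 else 5 := by
  rw [pvBisect]; norm_num [pvThresholds, PySem.List.pyGet?, PySem.List.pyIdx?, Int.toNat, Int.toNat, pvB_leaf, pvB_56]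

theorem pvB_59 (deg : Int) : pvBisect deg 5 9 =
    if 272 < deg then (if 328 < deg then 9 else 8)
    else if 240 < deg then 7 else if 191 < deg then 6 else 5 := by
  rw [pvBisect]; norm_num [pvThresholds, PySem.List.pyGet?, PySem.List.pyIdx?, Int.toNat, Int.toNat, pvB_89, pvB_57]

theorem pvB_09 (deg : Int) : pvBisect deg 0 9 =
    if 166 < deg then
      (if 272 < deg then (if 328 < deg then 9 else 8)
       else if 240 < deg then 7 else if 191 < deg then 6 else 5)
    else
      (if 92 < deg then (if 138 < deg then 4 else 3)
       else if 49 < deg then 2 else if 20 < deg then 1 else 0) := by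
  rw [pvBisect]; norm_num [pvThresholds, PySem.List.pyGet?, PySem.List.pyIdx?, Int.toNat, Int.toNat, pvB_59, pvB_04]

-- ===== VERDICT (by name: the statement is the Claim_ definition above) =====
theorem get_node_no_spec : Claim_equal_get_node_no := by
  intro deg _
  unfold Spec_get_node_no get_node_no get_node_no_alt
  simp only [get_node_no_loop, NODES_ANGLE, PySem.List.pyGet?, PySem.List.pyIdx?, Int.toNat, pvB_09]
  norm_num
  split_ifs <;> omega
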